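-- pv_equiv track=rewrite | github.com/hfscdogg/permit-miner | pipeline/segmentation.py | resolve_segment
-- ===== SOURCE A (Python) =====
-- SEGMENT_PRIORITY = (
--     "new_construction",
--     "major_remodel",
--     "kitchen_bath",
--     "outdoor_living",
-- )
--
-- SEGMENT_TAG_MAP: dict[str, tuple[str, ...]] = {
--     "new_construction": ("new_construction", "new construction", "single family"),
--     "major_remodel":    ("addition", "renovation", "remodel", "master suite", "master bedroom"),
--     "kitchen_bath":     ("kitchen", "bathroom"),
--     "outdoor_living":   ("pool", "deck", "patio", "outdoor kitchen", "detached garage"),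
-- }
--
-- def resolve_segment(tags: list[str], is_new_construction: bool) -> str:
--     """Collapse a tag list to a single segment id using SEGMENT_PRIORITY."""
--     if is_new_construction:
--         return "new_construction"
--     tag_set = {t.lower() for t in (tags or [])}
--     for segment in SEGMENT_PRIORITY:
--         for keyword in SEGMENT_TAG_MAP[segment]:
--             if keyword in tag_set:
--                 return segment
--     return "default"
-- ===== SOURCE B (Python) =====
-- SEGMENT_PRIORITY = (
--     "new_construction",
--     "major_remodel",
--     "kitchen_bath",
--     "outdoor_living",
-- )
--
-- SEGMENT_TAG_MAP: dict[str, tuple[str, ...]] = {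
--     "new_construction": ("new_construction", "new construction", "single family"),
--     "major_remodel":    ("addition", "renovation", "remodel", "master suite", "master bedroom"),
--     "kitchen_bath":     ("kitchen", "bathroom"),
--     "outdoor_living":   ("pool", "deck", "patio", "outdoor kitchen", "detached garage"),
-- }
--
-- # inverted index: lowercased keyword -> priority index of its segment
-- _KEYWORD_INDEX = {
--     kw: i
--     for i, seg in enumerate(SEGMENT_PRIORITY)
--     for kw in SEGMENT_TAG_MAP[seg]
-- }
--
-- def resolve_segment(tags, is_new_construction):
--     """Collapse a tag list to a single segment id using SEGMENT_PRIORITY."""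
--     if is_new_construction:
--         return "new_construction"
--     best = None
--     for t in (tags or []):
--         i = _KEYWORD_INDEX.get(t.lower())
--         if i is not None and (best is None or i < best):
--             best = i
--     return "default" if best is None else SEGMENT_PRIORITY[best]
-- ===== Notes on version B (the rewrite author's own statement) =====
-- stated objective: alternative
-- what changed: Replaces A's set-building plus nested scan over segments and keywords with a precomputed inverted keyword->priority-index dict and a single pass over the tags keeping the minimum priority index.
import Mathlib
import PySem

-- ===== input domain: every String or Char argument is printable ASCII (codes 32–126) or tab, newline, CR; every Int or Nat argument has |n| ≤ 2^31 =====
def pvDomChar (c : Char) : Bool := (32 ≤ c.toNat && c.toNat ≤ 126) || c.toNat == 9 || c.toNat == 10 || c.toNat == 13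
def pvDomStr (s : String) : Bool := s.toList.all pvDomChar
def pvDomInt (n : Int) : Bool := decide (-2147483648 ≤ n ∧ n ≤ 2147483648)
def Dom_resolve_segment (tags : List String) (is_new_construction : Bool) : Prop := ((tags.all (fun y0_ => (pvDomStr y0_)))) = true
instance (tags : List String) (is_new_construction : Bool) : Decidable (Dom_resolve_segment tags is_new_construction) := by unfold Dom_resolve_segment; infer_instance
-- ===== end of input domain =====

-- B replaces A's tag-set plus nested segment/keyword scan by a precomputed inverted
-- keyword -> priority-index dict and a single minimum-index pass over the tags.

-- ===== PORT A =====
def SEGMENT_PRIORITY : List String :=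
  ["new_construction", "major_remodel", "kitchen_bath", "outdoor_living"]

def SEGMENT_TAG_MAP : PySem.Dict String (List String) :=
  PySem.Dict.mk [
    ("new_construction", ["new_construction", "new construction", "single family"]),
    ("major_remodel", ["addition", "renovation", "remodel", "master suite", "master bedroom"]),
    ("kitchen_bath", ["kitchen", "bathroom"]),
    ("outdoor_living", ["pool", "deck", "patio", "outdoor kitchen", "detached garage"])]

-- inner loop 'for keyword in SEGMENT_TAG_MAP[segment]: if keyword in tag_set: return segment'
def aFindKw (tagSet : PySem.Set String) : List String → Bool
  | [] => false
  | kw :: rest => if PySem.Set.contains tagSet kw then true else aFindKw tagSet rest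

-- outer loop 'for segment in SEGMENT_PRIORITY: …' with early return
def aScanSeg (tagSet : PySem.Set String) : List String → String
  | [] => "default"
  | seg :: rest =>
      if aFindKw tagSet (SEGMENT_TAG_MAP.getD seg []) then seg else aScanSeg tagSet rest

def resolve_segment (tags : List String) (is_new_construction : Bool) : String :=
  if is_new_construction then "new_construction"
  else
    let tag_set : PySem.Set String := PySem.Set.ofList (tags.map PySem.Str.lower)
    aScanSeg tag_set SEGMENT_PRIORITY

-- ===== PORT B =====
-- inverted index: lowercased keyword -> priority index of its segment
def KEYWORD_INDEX : PySem.Dict String Int :=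
  PySem.Dict.mk [
    ("new_construction", 0), ("new construction", 0), ("single family", 0),
    ("addition", 1), ("renovation", 1), ("remodel", 1), ("master suite", 1), ("master bedroom", 1),
    ("kitchen", 2), ("bathroom", 2),
    ("pool", 3), ("deck", 3), ("patio", 3), ("outdoor kitchen", 3), ("detached garage", 3)]

-- 'for t in tags: i = _KEYWORD_INDEX.get(t.lower()); if i is not None and (best is None or i < best): best = i'
def bBest (best : Option Int) : List String → Option Int
  | [] => best
  | t :: rest =>
      match KEYWORD_INDEX.get? (PySem.Str.lower t) with
      | none => bBest best rest
      | some i =>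
          match best with
          | none => bBest (some i) rest
          | some b => bBest (if i < b then some i else some b) rest

def resolve_segment_alt (tags : List String) (is_new_construction : Bool) : String :=
  if is_new_construction then "new_construction"
  else
    match bBest none tags with
    | none => "default"
    | some i => PySem.List.pyGetD SEGMENT_PRIORITY i "default"

-- ===== PRECONDITION & SPEC =====
def Spec_resolve_segment (tags : List String) (is_new_construction : Bool) (out : String) : Prop := out = resolve_segment_alt tags is_new_construction
instance (tags : List String) (is_new_construction : Bool) (out : String) : Decidable (Spec_resolve_segment tags is_new_construction out) := by unfold Spec_resolve_segment; infer_instance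

-- ===== CLAIM (what is proved, stated in full; the proofs are below) =====
def Claim_equal_resolve_segment : Prop := ∀ (tags : List String) (is_new_construction : Bool), Dom_resolve_segment tags is_new_construction → Spec_resolve_segment tags is_new_construction (resolve_segment tags is_new_construction)

-- ===== LEMMAS AND PROOFS =====

-- 'segment i has a matching tag': some tag lowercases to a keyword of priority index i
def segHit (i : Int) (tags : List String) : Bool :=
  tags.any (fun t => KEYWORD_INDEX.get? (PySem.Str.lower t) == some i)

-- the minimum priority index found among the tags, as nested ifs on segHit
def minIdx (tags : List String) : Option Int :=
  if segHit 0 tags then some 0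
  else if segHit 1 tags then some 1
  else if segHit 2 tags then some 2
  else if segHit 3 tags then some 3
  else none

-- KEYWORD_INDEX lookups, characterised keyword by keyword, and the possible results
theorem kwIdx_spec (u : String) :
    ((u == "new_construction" || u == "new construction" || u == "single family") = (KEYWORD_INDEX.get? u == some 0))
  ∧ ((u == "addition" || u == "renovation" || u == "remodel" || u == "master suite" || u == "master bedroom") = (KEYWORD_INDEX.get? u == some 1))
  ∧ ((u == "kitchen" || u == "bathroom") = (KEYWORD_INDEX.get? u == some 2))
  ∧ ((u == "pool" || u == "deck" || u == "patio" || u == "outdoor kitchen" || u == "detached garage") = (KEYWORD_INDEX.get? u == some 3))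
  ∧ (KEYWORD_INDEX.get? u = none ∨ KEYWORD_INDEX.get? u = some 0 ∨ KEYWORD_INDEX.get? u = some 1 ∨
     KEYWORD_INDEX.get? u = some 2 ∨ KEYWORD_INDEX.get? u = some 3) := by
  by_cases h1 : u = "new_construction"; · subst h1; exact ⟨by decide, by decide, by decide, by decide, by decide⟩
  by_cases h2 : u = "new construction"; · subst h2; exact ⟨by decide, by decide, by decide, by decide, by decide⟩
  by_cases h3 : u = "single family"; · subst h3; exact ⟨by decide, by decide, by decide, by decide, by decide⟩
  by_cases h4 : u = "addition"; · subst h4; exact ⟨by decide, by decide, by decide, by decide, by decide⟩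
  by_cases h5 : u = "renovation"; · subst h5; exact ⟨by decide, by decide, by decide, by decide, by decide⟩
  by_cases h6 : u = "remodel"; · subst h6; exact ⟨by decide, by decide, by decide, by decide, by decide⟩
  by_cases h7 : u = "master suite"; · subst h7; exact ⟨by decide, by decide, by decide, by decide, by decide⟩
  by_cases h8 : u = "master bedroom"; · subst h8; exact ⟨by decide, by decide, by decide, by decide, by decide⟩
  by_cases h9 : u = "kitchen"; · subst h9; exact ⟨by decide, by decide, by decide, by decide, by decide⟩
  by_cases h10 : u = "bathroom"; · subst h10; exact ⟨by decide, by decide, by decide, by decide, by decide⟩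
  by_cases h11 : u = "pool"; · subst h11; exact ⟨by decide, by decide, by decide, by decide, by decide⟩
  by_cases h12 : u = "deck"; · subst h12; exact ⟨by decide, by decide, by decide, by decide, by decide⟩
  by_cases h13 : u = "patio"; · subst h13; exact ⟨by decide, by decide, by decide, by decide, by decide⟩
  by_cases h14 : u = "outdoor kitchen"; · subst h14; exact ⟨by decide, by decide, by decide, by decide, by decide⟩
  by_cases h15 : u = "detached garage"; · subst h15; exact ⟨by decide, by decide, by decide, by decide, by decide⟩
  have g1 : ¬("new_construction" = u) := fun h => h1 h.symm
  have g2 : ¬("new construction" = u) := fun h => h2 h.symm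
  have g3 : ¬("single family" = u) := fun h => h3 h.symm
  have g4 : ¬("addition" = u) := fun h => h4 h.symm
  have g5 : ¬("renovation" = u) := fun h => h5 h.symm
  have g6 : ¬("remodel" = u) := fun h => h6 h.symm
  have g7 : ¬("master suite" = u) := fun h => h7 h.symm
  have g8 : ¬("master bedroom" = u) := fun h => h8 h.symm
  have g9 : ¬("kitchen" = u) := fun h => h9 h.symm
  have g10 : ¬("bathroom" = u) := fun h => h10 h.symm
  have g11 : ¬("pool" = u) := fun h => h11 h.symm
  have g12 : ¬("deck" = u) := fun h => h12 h.symm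
  have g13 : ¬("patio" = u) := fun h => h13 h.symm
  have g14 : ¬("outdoor kitchen" = u) := fun h => h14 h.symm
  have g15 : ¬("detached garage" = u) := fun h => h15 h.symm
  have hval : KEYWORD_INDEX.get? u = none := by
    simp only [KEYWORD_INDEX, PySem.Dict.get?_mk_cons, beq_iff_eq]
    simp [g1, g2, g3, g4, g5, g6, g7, g8, g9, g10, g11, g12, g13, g14, g15, PySem.Dict.get?]
  refine ⟨?_, ?_, ?_, ?_, Or.inl hval⟩ <;>
    simp [hval, h1, h2, h3, h4, h5, h6, h7, h8, h9, h10, h11, h12, h13, h14, h15]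

theorem pv_any_or {α : Type} (l : List α) (p q : α → Bool) :
    l.any (fun x => p x || q x) = (l.any p || l.any q) := by
  induction l with
  | nil => rfl
  | cons x xs ih =>
      simp only [List.any_cons, ih]
      cases p x <;> cases q x <;> cases xs.any p <;> cases xs.any q <;> rfl

theorem pv_contains_map {α β : Type} [BEq β] [LawfulBEq β] (l : List α) (f : α → β) (y : β) :
    (l.map f).contains y = l.any (fun x => f x == y) := by
  induction l with
  | nil => rfl
  | cons x xs ih => simp only [List.map_cons, List.contains_cons, List.any_cons, ih, Bool.beq_comm]

theorem set_contains_ofList (l : List String) (x : String) :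
    PySem.Set.contains (PySem.Set.ofList l) x = l.contains x := by
  simp [PySem.Set.contains]

theorem aFindKw_any (tagSet : PySem.Set String) (kws : List String) :
    aFindKw tagSet kws = kws.any (fun kw => PySem.Set.contains tagSet kw) := by
  induction kws with
  | nil => rfl
  | cons kw rest ih => cases h : PySem.Set.contains tagSet kw <;> simp [aFindKw, h, ih]

theorem segHit_or (tags : List String) :
    (segHit 0 tags = ((tags.map PySem.Str.lower).contains "new_construction" ||
        ((tags.map PySem.Str.lower).contains "new construction" ||
         (tags.map PySem.Str.lower).contains "single family")))
  ∧ (segHit 1 tags = ((tags.map PySem.Str.lower).contains "addition" ||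
        ((tags.map PySem.Str.lower).contains "renovation" ||
         ((tags.map PySem.Str.lower).contains "remodel" ||
          ((tags.map PySem.Str.lower).contains "master suite" ||
           (tags.map PySem.Str.lower).contains "master bedroom")))))
  ∧ (segHit 2 tags = ((tags.map PySem.Str.lower).contains "kitchen" ||
        (tags.map PySem.Str.lower).contains "bathroom"))
  ∧ (segHit 3 tags = ((tags.map PySem.Str.lower).contains "pool" ||
        ((tags.map PySem.Str.lower).contains "deck" ||
         ((tags.map PySem.Str.lower).contains "patio" ||
          ((tags.map PySem.Str.lower).contains "outdoor kitchen" ||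
           (tags.map PySem.Str.lower).contains "detached garage"))))) := by
  refine ⟨?_, ?_, ?_, ?_⟩ <;>
    · simp only [pv_contains_map, ← pv_any_or, segHit]
      refine congrArg (List.any tags) (funext fun t => ?_)
      have hs := kwIdx_spec (PySem.Str.lower t)
      simp only [← hs.1, ← hs.2.1, ← hs.2.2.1, ← hs.2.2.2.1]
      try simp [Bool.or_assoc]

theorem A_char (tags : List String) :
    resolve_segment tags false =
      (if segHit 0 tags then "new_construction"
       else if segHit 1 tags then "major_remodel"
       else if segHit 2 tags then "kitchen_bath"
       else if segHit 3 tags then "outdoor_living"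
       else "default") := by
  have m1 : SEGMENT_TAG_MAP.getD "new_construction" [] = ["new_construction", "new construction", "single family"] := by decide
  have m2 : SEGMENT_TAG_MAP.getD "major_remodel" [] = ["addition", "renovation", "remodel", "master suite", "master bedroom"] := by decide
  have m3 : SEGMENT_TAG_MAP.getD "kitchen_bath" [] = ["kitchen", "bathroom"] := by decide
  have m4 : SEGMENT_TAG_MAP.getD "outdoor_living" [] = ["pool", "deck", "patio", "outdoor kitchen", "detached garage"] := by decide
  have hs := segHit_or tags
  simp only [resolve_segment, Bool.false_eq_true, if_false, SEGMENT_PRIORITY, aScanSeg,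
    m1, m2, m3, m4, aFindKw_any, List.any_cons, List.any_nil, Bool.or_false,
    set_contains_ofList, ← hs.1, ← hs.2.1, ← hs.2.2.1, ← hs.2.2.2]

theorem bBest_some (ts : List String) : ∀ b : Int,
    bBest (some b) ts =
      (match bBest none ts with
       | none => some b
       | some j => some (min b j)) := by
  induction ts with
  | nil => intro b; rfl
  | cons t rest ih =>
      intro b
      rcases (kwIdx_spec (PySem.Str.lower t)).2.2.2.2 with h | h | h | h | h <;>
        · simp only [bBest, h]
          first
          | exact ih b
          | · rw [show ∀ i : Int, (if i < b then some i else some b) = some (min i b) by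
                    intro i; split_ifs with hib <;> simp [min_def] <;> omega]
              rw [ih, ih]
              cases hrest : bBest none rest <;> simp [min_comm, min_left_comm]

theorem bBest_none_eq (tags : List String) : bBest none tags = minIdx tags := by
  induction tags with
  | nil => simp [bBest, minIdx, segHit]
  | cons t ts ih =>
      have hseg : ∀ i : Int, segHit i (t :: ts) =
          ((KEYWORD_INDEX.get? (PySem.Str.lower t) == some i) || segHit i ts) := by
        intro i; simp [segHit]
      rcases (kwIdx_spec (PySem.Str.lower t)).2.2.2.2 with h | h | h | h | h <;>
        simp only [bBest, h] <;>
        [skip; rw [bBest_some]; rw [bBest_some]; rw [bBest_some]; rw [bBest_some]] <;>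
        rw [ih] <;>
        simp only [minIdx, hseg, h] <;>
        by_cases s0 : segHit 0 ts = true <;> by_cases s1 : segHit 1 ts = true <;>
        by_cases s2 : segHit 2 ts = true <;> by_cases s3 : segHit 3 ts = true <;>
        simp_all

-- ===== VERDICT (by name: the statement is the Claim_ definition above) =====
theorem resolve_segment_spec : Claim_equal_resolve_segment := by
  intro tags inc _
  unfold Spec_resolve_segment
  cases inc with
  | true => rfl
  | false =>
      rw [A_char]
      show _ = resolve_segment_alt tags false
      unfold resolve_segment_alt
      rw [bBest_none_eq]
      unfold minIdx
      by_cases h0 : segHit 0 tags = true <;> by_cases h1 : segHit 1 tags = true <;>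
        by_cases h2 : segHit 2 tags = true <;> by_cases h3 : segHit 3 tags = true <;>
        simp_all <;> rfl
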